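-- pv_equiv track=rewrite | github.com/pypi-data/pypi-mirror-98 | packages/LnkParse3/LnkParse3-1.1.0.tar.gz/LnkParse3-1.1.0/LnkParse3/decorators.py | _quad_to_hex
-- ===== SOURCE A (Python) =====
-- def _quad_to_hex(quad):
--     # An implemetation is based on
--     # https://metadataconsulting.blogspot.com/2019/12/CSharp-Convert-a-GUID-to-a-Darwin-Descriptor-and-back.html
--     base_85 = "!$%&'()*+,-.0123456789=?@ABCDEFGHIJKLMNOPQRSTUVWXYZ[]^_`abcdefghijklmnopqrstuvwxyz{}~"
--     i = 5
--     ddec = 0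
--     while i >= 1:
--         char = quad[i - 1]
--         b85 = base_85.find(char)
--         ddec = ddec + b85
--         if i > 1:
--             ddec = ddec * 85
--         i -= 1
--
--     return f"{ddec:08X}"
-- ===== SOURCE B (Python) =====
-- def _quad_to_hex(quad):
--     # Table-driven: build a char->value dict once, then one forward pass over the
--     # five positions with a running positional weight (no backward Horner loop,
--     # no repeated .find scan of the alphabet).
--     base_85 = "!$%&'()*+,-.0123456789=?@ABCDEFGHIJKLMNOPQRSTUVWXYZ[]^_`abcdefghijklmnopqrstuvwxyz{}~"
--     value = {c: v for v, c in enumerate(base_85)}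
--     ddec, w = 0, 1
--     for k in range(5):
--         ddec += value.get(quad[k], -1) * w
--         w *= 85
--     return f"{ddec:08X}"
-- ===== Notes on version B (the rewrite author's own statement) =====
-- stated objective: alternative
-- what changed: Replaces the backward indexed while-loop Horner accumulation with its conditional multiply and per-step base_85.find scans by a char-to-value dict built once from enumerate(base_85) and a single forward pass over quad[:5] with a running positional weight.
import Mathlib
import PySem

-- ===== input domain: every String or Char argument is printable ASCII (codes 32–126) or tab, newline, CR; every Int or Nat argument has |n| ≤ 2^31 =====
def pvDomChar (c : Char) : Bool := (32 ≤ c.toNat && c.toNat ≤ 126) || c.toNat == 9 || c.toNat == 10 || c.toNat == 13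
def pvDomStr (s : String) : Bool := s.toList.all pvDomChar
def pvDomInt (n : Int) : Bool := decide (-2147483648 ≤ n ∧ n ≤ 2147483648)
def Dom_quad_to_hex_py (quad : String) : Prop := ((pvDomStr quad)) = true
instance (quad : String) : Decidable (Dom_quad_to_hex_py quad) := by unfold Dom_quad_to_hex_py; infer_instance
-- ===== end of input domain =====

-- B replaces A's backward indexed Horner while-loop (repeated base_85.find scans) by a
-- char→value table built once plus one forward pass with a running weight (simpler).

-- shared faithful model of Python's f"{n:08X}" (uppercase hex, zero-padded to width 8, sign in front)
def pvHexDigit (n : Nat) : Char :=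
  (['0','1','2','3','4','5','6','7','8','9','A','B','C','D','E','F']).getD n '0'

def pvHexChars (n : Nat) : List Char :=
  if _h : n < 16 then [pvHexDigit n]
  else pvHexChars (n / 16) ++ [pvHexDigit (n % 16)]
  decreasing_by exact Nat.div_lt_self (by omega) (by omega)

def pvFormatHex08 (n : Int) : String :=
  PySem.Str.zfill (String.ofList (if n < 0 then '-' :: pvHexChars n.natAbs else pvHexChars n.natAbs)) 8

def pvBase85 : String :=
  "!$%&'()*+,-.0123456789=?@ABCDEFGHIJKLMNOPQRSTUVWXYZ[]^_`abcdefghijklmnopqrstuvwxyz{}~"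

-- ===== PORT A =====
-- while i >= 1: …; i -= 1   — fuel = i; quad[i-1] via pyGet? (Pre_ keeps it in range)
def quadLoopA (quad : String) : Nat → Int → Int
  | 0, ddec => ddec
  | i + 1, ddec =>
    let char := (PySem.Str.pyGet? quad ((i + 1 : Int) - 1)).getD (Char.ofNat 0)
    let b85 := PySem.Str.find pvBase85 (String.ofList [char])
    let ddec := ddec + b85
    let ddec := if (i + 1 : Int) > 1 then ddec * 85 else ddec
    quadLoopA quad i ddec

def quad_to_hex_py (quad : String) : String :=
  pvFormatHex08 (quadLoopA quad 5 0)

-- ===== PORT B =====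
-- value = {c: v for v, c in enumerate(base_85)}
def pvB85Table : PySem.Dict Char Int :=
  (PySem.List.enumerate pvBase85.toList 0).foldl (fun d p => d.insert p.2 p.1) PySem.Dict.empty

-- for k in range(5): ddec += value.get(quad[k], -1) * w; w *= 85
def quad_to_hex_py_alt (quad : String) : String :=
  pvFormatHex08 (((PySem.List.pyRange 0 5 1).foldl
    (fun st k =>
      (st.1 + pvB85Table.getD ((PySem.Str.pyGet? quad k).getD (Char.ofNat 0)) (-1) * st.2,
        st.2 * 85))
    ((0 : Int), (1 : Int))).1)

-- ===== PRECONDITION & SPEC =====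
-- A raises IndexError when len(quad) < 5 (quad[4] out of range); those inputs are excluded.
def Pre_quad_to_hex_py (quad : String) : Prop := 5 ≤ quad.toList.length
instance (quad : String) : Decidable (Pre_quad_to_hex_py quad) := by unfold Pre_quad_to_hex_py; infer_instance
def pvWitness_quad_to_hex_py : String := "M)x0s"

def Spec_quad_to_hex_py (quad : String) (out : String) : Prop := out = quad_to_hex_py_alt quad
instance (quad : String) (out : String) : Decidable (Spec_quad_to_hex_py quad out) := by unfold Spec_quad_to_hex_py; infer_instance

-- ===== CLAIM (what is proved, stated in full; the proofs are below) =====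
def Claim_equal_quad_to_hex_py : Prop := ∀ (quad : String), Dom_quad_to_hex_py quad → Pre_quad_to_hex_py quad → Spec_quad_to_hex_py quad (quad_to_hex_py quad)

-- ===== LEMMAS AND PROOFS =====

-- l[n]? = some c → idxOf c l ≤ n
theorem pv_idxOf_le {l : List Char} : ∀ {n : Nat} {c : Char}, l[n]? = some c → l.idxOf c ≤ n := by
  induction l with
  | nil => intro n c h; simp at h
  | cons x xs ih =>
    intro n c h
    cases n with
    | zero => simp at h; simp [h, List.idxOf_cons_self]
    | succ m =>
      simp at h
      by_cases hcx : c = x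
      · simp [hcx, List.idxOf_cons_self]
      · rw [List.idxOf_cons_ne _ (by exact fun he => hcx he.symm)]
        exact Nat.succ_le_succ (ih h)

-- find on a singleton pattern is idxOf (or -1)
theorem pv_find_singleton (l : List Char) (c : Char) :
    PySem.Chars.find l [c] = if c ∈ l then (l.idxOf c : Int) else -1 := by
  by_cases hm : c ∈ l
  · obtain ⟨s, t, rfl⟩ := List.append_of_mem hm
    have hinf : [c] <:+: s ++ c :: t := ⟨s, t, by simp⟩
    have h0 : 0 ≤ PySem.Chars.find (s ++ c :: t) [c] := (PySem.Chars.find_nonneg_iff _ _).mpr hinf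
    obtain ⟨hpre, hmin⟩ := PySem.Chars.find_spec h0
    set L := s ++ c :: t with hL
    set n := (PySem.Chars.find L [c]).toNat with hn
    have hgn : L[n]? = some c := by
      obtain ⟨u, hu⟩ := hpre
      have : (L.drop n).head? = some c := by rw [← hu]; rfl
      rwa [List.head?_drop] at this
    have hle : L.idxOf c ≤ n := pv_idxOf_le hgn
    have hlt : L.idxOf c < L.length := List.idxOf_lt_length_of_mem hm
    have hge : n ≤ L.idxOf c := by
      by_contra hlt'
      push_neg at hlt'
      apply hmin (L.idxOf c) hlt'
      refine ⟨L.drop (L.idxOf c + 1), ?_⟩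
      have hgi := List.getElem_idxOf hlt
      calc [c] ++ L.drop (L.idxOf c + 1) = L[L.idxOf c] :: L.drop (L.idxOf c + 1) := by
            rw [hgi]; rfl
        _ = L.drop (L.idxOf c) := List.getElem_cons_drop hlt
    have : n = L.idxOf c := Nat.le_antisymm hge hle
    simp only [hm, if_true]
    omega
  · rw [if_neg hm]
    apply (PySem.Chars.find_eq_neg_one_iff _ _).mpr
    intro ⟨s, t, he⟩
    exact hm (by rw [← he]; simp)

-- the dict built by the enumerate-fold looks up the first index, like idxOf
theorem pv_getD_enumFold (l : List Char) : ∀ (s : Int) (d : PySem.Dict Char Int) (c : Char),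
    l.Nodup →
    ((PySem.List.enumerate l s).foldl (fun d p => d.insert p.2 p.1) d).getD c (-1) =
      if c ∈ l then s + (l.idxOf c : Int) else d.getD c (-1) := by
  induction l with
  | nil => intro s d c _; simp [PySem.List.enumerate_nil]
  | cons x xs ih =>
    intro s d c hnd
    rw [PySem.List.enumerate_cons]
    simp only [List.foldl_cons]
    rw [ih (s + 1) (d.insert x s) c hnd.of_cons]
    by_cases hx : c ∈ xs
    · have hcx : c ≠ x := fun he => (List.nodup_cons.mp hnd).1 (he ▸ hx)
      rw [if_pos hx, if_pos (List.mem_cons.mpr (Or.inr hx)),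
        List.idxOf_cons_ne _ (fun he => hcx he.symm)]
      push_cast; ring
    · rw [if_neg hx, PySem.Dict.getD_insert]
      by_cases hcx : c = x
      · simp [hcx, List.idxOf_cons_self]
      · rw [if_neg hcx, if_neg (by simp [hcx, hx])]

-- per-character bridge: table lookup = base_85.find
theorem pv_table_eq_find (c : Char) :
    pvB85Table.getD c (-1) = PySem.Str.find pvBase85 (String.ofList [c]) := by
  have hnd : pvBase85.toList.Nodup := by decide
  rw [PySem.Str.find_eq]
  show pvB85Table.getD c (-1) = PySem.Chars.find pvBase85.toList (String.ofList [c]).toList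
  have hc : (String.ofList [c]).toList = [c] := by simp
  rw [hc, pv_find_singleton, pvB85Table, pv_getD_enumFold _ 0 _ _ hnd]
  by_cases hm : c ∈ pvBase85.toList
  · simp [hm]
  · simp [hm, PySem.Dict.getD_empty]

theorem quad_to_hex_chars (quad : String) (c0 c1 c2 c3 c4 : Char) (rest : List Char)
    (h : quad.toList = c0 :: c1 :: c2 :: c3 :: c4 :: rest) :
    quad_to_hex_py quad = quad_to_hex_py_alt quad := by
  simp only [quad_to_hex_py, quad_to_hex_py_alt, quadLoopA]
  norm_num [PySem.List.pyRange, List.range_succ, pv_table_eq_find, PySem.Str.pyGet?_eq, PySem.Chars.pyGet?_eq_listPyGet?,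
    PySem.List.pyGet?_natCast, PySem.List.pyGet?_of_nonneg, h,
    (by decide : Int.toNat 5 = 5), (by decide : Int.toNat 4 = 4), (by decide : Int.toNat 3 = 3),
    (by decide : Int.toNat 2 = 2), List.map_append, List.foldl_append]
  ring_nf

-- ===== VERDICT (by name: the statement is the Claim_ definition above) =====
theorem quad_to_hex_py_spec : Claim_equal_quad_to_hex_py := by
  intro quad _ hpre
  unfold Pre_quad_to_hex_py at hpre
  rcases h : quad.toList with _ | ⟨c0, _ | ⟨c1, _ | ⟨c2, _ | ⟨c3, _ | ⟨c4, rest⟩⟩⟩⟩⟩ <;>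
    rw [h] at hpre <;> simp at hpre
  exact quad_to_hex_chars quad c0 c1 c2 c3 c4 rest h
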